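-- pv_equiv track=rewrite | github.com/positronmxt/kuppel | freecad_dome/tessellation.py | _edges_from_polygons
-- ===== SOURCE A (Python) =====
-- from typing import Dict, Iterable, List, Tuple, Set
--
-- Edge = Tuple[int, int]
--
-- def _ordered_edge(a: int, b: int) -> Edge:
--     return (a, b) if a < b else (b, a)
--
-- def _edges_from_polygons(polygons: List[List[int]]) -> Dict[Edge, List[int]]:
--     edge_map: Dict[Edge, List[int]] = {}
--     for panel_idx, polygon in enumerate(polygons):
--         count = len(polygon)
--         for i in range(count):
--             edge = _ordered_edge(polygon[i], polygon[(i + 1) % count])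
--             panel_list = edge_map.setdefault(edge, [])
--             panel_list.append(panel_idx)
--     return edge_map
-- ===== SOURCE B (Python) =====
-- Edge = tuple
--
-- def _ordered_edge(a, b):
--     return (a, b) if a < b else (b, a)
--
-- def _edges_from_polygons(polygons):
--     # Phase 1: flatten every polygon into (ordered_edge, panel_idx) pairs.
--     pairs = []
--     for panel_idx, polygon in enumerate(polygons):
--         count = len(polygon)
--         for i in range(count):
--             pairs.append((_ordered_edge(polygon[i], polygon[(i + 1) % count]), panel_idx))
--     # Phase 2: distinct edges in first-appearance order.
--     order = []
--     seen = set()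
--     for edge, _ in pairs:
--         if edge not in seen:
--             seen.add(edge)
--             order.append(edge)
--     # Phase 3: group panel indices per edge from the flat pair list.
--     return {edge: [idx for e, idx in pairs if e == edge] for edge in order}
-- ===== Notes on version B (the rewrite author's own statement) =====
-- stated objective: alternative
-- what changed: B replaces A's incremental setdefault-dict accumulation with a three-phase pipeline: flatten all (edge, panel) pairs, deduplicate edges in first-appearance order, then build the dict by grouping panel indices per edge from the flat pair list.
import Mathlib
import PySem

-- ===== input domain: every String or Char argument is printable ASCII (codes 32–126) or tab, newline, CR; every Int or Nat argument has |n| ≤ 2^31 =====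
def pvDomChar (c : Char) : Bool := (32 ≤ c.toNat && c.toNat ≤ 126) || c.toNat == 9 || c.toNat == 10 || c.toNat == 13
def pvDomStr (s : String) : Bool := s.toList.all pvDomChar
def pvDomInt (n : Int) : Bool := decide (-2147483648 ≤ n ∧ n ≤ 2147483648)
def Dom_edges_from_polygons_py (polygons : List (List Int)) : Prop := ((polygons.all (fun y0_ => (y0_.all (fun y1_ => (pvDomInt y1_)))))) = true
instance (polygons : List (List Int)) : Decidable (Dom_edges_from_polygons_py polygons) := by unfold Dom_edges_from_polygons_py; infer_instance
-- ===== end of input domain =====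

-- B groups the flat (edge, panel) pair list per first-appearance edge instead of A's incremental setdefault-dict; return values are identical.

-- ===== PORT A =====
-- _ordered_edge, shared by both Python sources
def ordered_edge_py (a b : Int) : Int × Int := if a < b then (a, b) else (b, a)

-- the loop-body expression _ordered_edge(polygon[i], polygon[(i+1) % count]) with count = len(polygon)
-- (i always lies in range(count), so the pyGetD default 0 is never used)
def edgeAt_py (polygon : List Int) (i : Int) : Int × Int :=
  ordered_edge_py (PySem.List.pyGetD polygon i 0)
    (PySem.List.pyGetD polygon (PySem.Int.mod (i + 1) (polygon.length : Int)) 0)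

-- setdefault(edge, []) followed by the in-place append is d[edge] = d.get(edge, []) + [panel_idx] = Dict.modify
def edges_from_polygons_py (polygons : List (List Int)) : List (Int × Int × List Int) :=
  let edge_map : PySem.Dict (Int × Int) (List Int) :=
    (PySem.List.enumerate polygons).foldl (fun d pi =>
      (PySem.List.pyRange 0 (pi.2.length : Int) 1).foldl (fun d i =>
        d.modify (edgeAt_py pi.2 i) [] (· ++ [pi.1])) d) PySem.Dict.empty
  edge_map.items.map (fun p => (p.1.1, p.1.2, p.2))

-- ===== PORT B =====
def edges_from_polygons_py_alt (polygons : List (List Int)) : List (Int × Int × List Int) :=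
  -- Phase 1: flat pair list
  let pairs : List ((Int × Int) × Int) :=
    (PySem.List.enumerate polygons).foldl (fun acc pi =>
      (PySem.List.pyRange 0 (pi.2.length : Int) 1).foldl (fun acc i =>
        acc ++ [(edgeAt_py pi.2 i, pi.1)]) acc) []
  -- Phase 2: distinct edges in first-appearance order (seen : set, order : list)
  let so : PySem.Set (Int × Int) × List (Int × Int) :=
    pairs.foldl (fun st p =>
      if PySem.Set.contains st.1 p.1 then st
      else (PySem.Set.add st.1 p.1, st.2 ++ [p.1])) (PySem.Set.empty, [])
  -- Phase 3: dict comprehension grouping panel indices per edge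
  let d : PySem.Dict (Int × Int) (List Int) :=
    so.2.foldl (fun d e =>
      d.insert e ((pairs.filter (fun q => q.1 == e)).map (·.2))) PySem.Dict.empty
  d.items.map (fun p => (p.1.1, p.1.2, p.2))

-- ===== PRECONDITION & SPEC =====
def Spec_edges_from_polygons_py (polygons : List (List Int)) (out : List (Int × Int × List Int)) : Prop := out = edges_from_polygons_py_alt polygons
instance (polygons : List (List Int)) (out : List (Int × Int × List Int)) : Decidable (Spec_edges_from_polygons_py polygons out) := by unfold Spec_edges_from_polygons_py; infer_instance

-- ===== CLAIM (what is proved, stated in full; the proofs are below) =====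
def Claim_equal_edges_from_polygons_py : Prop := ∀ (polygons : List (List Int)), Dom_edges_from_polygons_py polygons → Spec_edges_from_polygons_py polygons (edges_from_polygons_py polygons)

-- ===== LEMMAS AND PROOFS =====

-- the flat (edge, panel) pair list both loops traverse
def pairsOf (polygons : List (List Int)) : List ((Int × Int) × Int) :=
  (PySem.List.enumerate polygons).flatMap (fun pi =>
    (PySem.List.pyRange 0 (pi.2.length : Int) 1).map (fun i => (edgeAt_py pi.2 i, pi.1)))

theorem foldl_flatMap_pv {α β γ : Type} (l : List α) (g : α → List β) (f : γ → β → γ) (init : γ) :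
    (l.flatMap g).foldl f init = l.foldl (fun acc x => (g x).foldl f acc) init := by
  induction l generalizing init with
  | nil => rfl
  | cons x xs ih => simp [List.flatMap_cons, List.foldl_append, ih]

theorem A_dict_eq (polygons : List (List Int)) (d0 : PySem.Dict (Int × Int) (List Int)) :
    (PySem.List.enumerate polygons).foldl (fun d pi =>
      (PySem.List.pyRange 0 (pi.2.length : Int) 1).foldl (fun d i =>
        d.modify (edgeAt_py pi.2 i) [] (· ++ [pi.1])) d) d0
    = (pairsOf polygons).foldl (fun d p => d.modify p.1 [] (· ++ [p.2])) d0 := by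
  rw [pairsOf, foldl_flatMap_pv]
  simp [List.foldl_map]

theorem B_pairs_eq (polygons : List (List Int)) :
    (PySem.List.enumerate polygons).foldl (fun acc pi =>
      (PySem.List.pyRange 0 (pi.2.length : Int) 1).foldl (fun acc i =>
        acc ++ [(edgeAt_py pi.2 i, pi.1)]) acc) []
    = pairsOf polygons := by
  simp only [PySem.List.foldl_append_eq_flatMap (g := fun i => _)]
  simp only [pairsOf, List.nil_append]
  congr 1
  funext pi
  induction PySem.List.pyRange 0 (pi.2.length : Int) 1 with
  | nil => rfl
  | cons x xs ih => simp [List.flatMap_cons, ih]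

theorem B_order_aux (ps : List ((Int × Int) × Int)) (s : PySem.Set (Int × Int)) :
    ps.foldl (fun st p =>
      if PySem.Set.contains st.1 p.1 then st
      else (PySem.Set.add st.1 p.1, st.2 ++ [p.1])) (s, s)
    = (PySem.Set.update s (ps.map (·.1)), PySem.Set.update s (ps.map (·.1))) := by
  induction ps generalizing s with
  | nil => simp [PySem.Set.update]
  | cons p ps ih =>
      have hstep : (if PySem.Set.contains s p.1 then (s, s)
          else (PySem.Set.add s p.1, s ++ [p.1]))
          = (PySem.Set.add s p.1, PySem.Set.add s p.1) := by
        simp [PySem.Set.add]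
        split_ifs <;> simp_all
      simp only [List.foldl_cons, hstep, ih, List.map_cons, PySem.Set.update, List.foldl_cons]

theorem B_order_eq (ps : List ((Int × Int) × Int)) :
    ps.foldl (fun st p =>
      if PySem.Set.contains st.1 p.1 then st
      else (PySem.Set.add st.1 p.1, st.2 ++ [p.1])) (PySem.Set.empty, [])
    = (PySem.Set.ofList (ps.map (·.1)), PySem.Set.ofList (ps.map (·.1))) := by
  have h := B_order_aux ps PySem.Set.empty
  simpa [PySem.Set.ofList_eq_foldl, PySem.Set.update, PySem.Set.empty] using h

-- ===== VERDICT (by name: the statement is the Claim_ definition above) =====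
theorem edges_from_polygons_py_spec : Claim_equal_edges_from_polygons_py := by
  intro polygons _
  show edges_from_polygons_py polygons = edges_from_polygons_py_alt polygons
  rw [edges_from_polygons_py, edges_from_polygons_py_alt]
  rw [A_dict_eq, B_pairs_eq, B_order_eq]
  set ps := pairsOf polygons with hps
  have hnd : (PySem.Set.ofList (ps.map (·.1))).Nodup := PySem.Set.nodup_ofList _
  have hknd : (List.foldl (fun d p => d.modify p.1 [] fun v => v ++ [p.2])
      (PySem.Dict.empty : PySem.Dict (Int × Int) (List Int)) ps).keys.Nodup := by
    apply PySem.Dict.nodup_keys_foldl_modify_key ps (fun p => p.1) [] (fun _ p v => v ++ [p.2])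
    simp [PySem.Dict.keys_empty]
  rw [PySem.Dict.items_eq_map_keys _ hknd []]
  rw [PySem.Dict.keys_foldl_modify_key ps (fun p => p.1) [] (fun _ p v => v ++ [p.2])]
  rw [PySem.Dict.items_foldl_insert_fresh (PySem.Set.ofList (ps.map (·.1))) (fun e => e)
        (fun e => (ps.filter (fun q => q.1 == e)).map (·.2)) PySem.Dict.empty
        (fun a _ => PySem.Dict.contains_empty a) (by simp [hnd])]
  simp [PySem.Set.update, ← PySem.Set.ofList_eq_foldl, PySem.Dict.getD_empty,
    PySem.Dict.getD_foldl_modify_append]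
  rfl
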